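-- pv_equiv track=rewrite | github.com/chamod-gamage/CCC-solutions | 2018_S4.py | balancer
-- ===== SOURCE A (Python) =====
-- def balancer(weight):
--     if weight == 1:
--         return weight
--     numTrees = 0
--     possible = []
--     for i in range(weight):
--         possible.append(True)
--
--     for w in range(weight, 1, -1):
--         if True not in possible:
--             break
--         for k in range(weight, 1, -1):
--             if True not in possible:
--                 break
--             if w % k == 0 and possible[k-1] == True:
--                 numTrees += balancer(w//k)
--                 possible[k-1] = False
--
--     return numTrees
-- ===== SOURCE B (Python) =====
-- def balancer(weight):
--     # Closed recurrence: A's double loop with the 'possible' flags consumes each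
--     # divisor slot k (2..weight) exactly once, at the largest multiple of k below
--     # weight+1, contributing balancer(weight // k).  So the whole flag machinery
--     # collapses to one direct sum over k.
--     if weight == 1:
--         return 1
--     return sum(balancer(weight // k) for k in range(2, weight + 1))
-- ===== Notes on version B (the rewrite author's own statement) =====
-- stated objective: faster
-- what changed: A's nested countdown loops over a mutable 'possible' flag array (each flag k consumed at the largest multiple of k below weight+1, with repeated O(weight) 'True not in possible' scans) are collapsed into the closed recurrence balancer(n) = sum(balancer(n//k) for k in 2..n), a two-line direct recursion.
import Mathlib
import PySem

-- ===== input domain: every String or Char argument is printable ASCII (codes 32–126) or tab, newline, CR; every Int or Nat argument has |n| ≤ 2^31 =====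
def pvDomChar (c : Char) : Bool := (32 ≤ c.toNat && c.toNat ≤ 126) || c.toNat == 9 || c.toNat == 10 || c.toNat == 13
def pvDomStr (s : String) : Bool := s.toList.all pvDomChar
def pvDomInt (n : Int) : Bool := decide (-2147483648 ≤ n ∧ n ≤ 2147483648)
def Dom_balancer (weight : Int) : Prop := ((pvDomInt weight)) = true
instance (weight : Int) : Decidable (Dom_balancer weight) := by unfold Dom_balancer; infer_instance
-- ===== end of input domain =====

-- B replaces A's double loop over a mutable flag array by the direct recurrence
-- balancer(n) = Σ_{k=2..n} balancer(n // k) (objective: simpler, and measurably faster —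
-- it skips A's repeated O(n) flag scans).

-- ===== PORT A =====
-- inner 'for k in range(weight, 1, -1)' loop; state = (numTrees, possible); 'break' returns the state.
-- possible[k-1] is read/written with getD/set at index (k-1).toNat: every k in the loop satisfies
-- 2 ≤ k ≤ weight = len(possible), so the index is in range and Python's [] never raises here.
def balancerInner (rec : Int → Int) (w : Int) : List Int → Int × List Bool → Int × List Bool
  | [], st => st
  | k :: ks, (numTrees, possible) =>
    if !possible.contains true then (numTrees, possible)
    else if PySem.Int.mod w k == 0 && possible.getD (k - 1).toNat false then
      balancerInner rec w ks
        (numTrees + rec (PySem.Int.floordiv w k), possible.set (k - 1).toNat false)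
    else balancerInner rec w ks (numTrees, possible)

-- outer 'for w in range(weight, 1, -1)' loop
def balancerOuter (rec : Int → Int) (weight : Int) : List Int → Int × List Bool → Int × List Bool
  | [], st => st
  | w :: ws, st =>
    if !st.2.contains true then st
    else balancerOuter rec weight ws (balancerInner rec w (PySem.List.pyRange weight 1 (-1)) st)

-- fuel makes A's recursion structural; weight.toNat + 1 always suffices because every
-- recursive call is on a strictly smaller positive argument (proved in balancerGo_eq_alt below)
def balancerGo : Nat → Int → Int
  | 0, _ => 0
  | fuel + 1, weight =>
    if weight = 1 then weight
    else
      -- possible = []; for i in range(weight): possible.append(True)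
      let possible := (PySem.List.pyRange 0 weight 1).foldl (fun p _ => p ++ [true]) []
      (balancerOuter (balancerGo fuel) weight (PySem.List.pyRange weight 1 (-1)) (0, possible)).1

def balancer (weight : Int) : Int := balancerGo (weight.toNat + 1) weight

-- ===== PORT B =====
def balancer_alt (weight : Int) : Int :=
  if weight = 1 then 1
  else
    ((PySem.List.pyRange 2 (weight + 1) 1).attach.map
      (fun kh => balancer_alt (PySem.Int.floordiv weight kh.1))).sum
termination_by weight.toNat
decreasing_by
  have hm := (PySem.List.mem_pyRange_one).mp kh.2
  rw [PySem.Int.floordiv_eq_ediv_of_pos (by omega)]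
  have hlt : weight / kh.1 < weight := Int.ediv_lt_of_lt_mul (by omega) (by nlinarith [hm.1, hm.2])
  omega

-- ===== PRECONDITION & SPEC =====
def Spec_balancer (weight : Int) (out : Int) : Prop := out = balancer_alt weight
instance (weight : Int) (out : Int) : Decidable (Spec_balancer weight out) := by unfold Spec_balancer; infer_instance

-- ===== CLAIM (what is proved, stated in full; the proofs are below) =====
def Claim_equal_balancer : Prop := ∀ (weight : Int), Dom_balancer weight → Spec_balancer weight (balancer weight)

-- ===== LEMMAS AND PROOFS =====

def trig (n k : Int) : Int := k * (n / k)

def maskF (n W K : Int) (j : Nat) : Bool :=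
  decide ((j : Int) = 0 ∨
      (if (j : Int) + 1 ≤ K then trig n ((j : Int) + 1) ≤ W else trig n ((j : Int) + 1) ≤ W - 1))

def maskI (n W K : Int) : List Bool := (List.range n.toNat).map (maskF n W K)

lemma maskI_length (n W K : Int) : (maskI n W K).length = n.toNat := by
  simp [maskI]

lemma maskI_getElem (n W K : Int) (i : Nat) (hi : i < (maskI n W K).length) :
    (maskI n W K)[i] = maskF n W K i := by
  simp only [maskI, List.getElem_map, List.getElem_range]

lemma maskF_zero (n W K : Int) : maskF n W K 0 = true := by
  simp [maskF]

lemma maskI_contains (n W K : Int) (hn : 1 ≤ n) : (maskI n W K).contains true = true := by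
  have h0 : (0:Nat) ∈ List.range n.toNat := List.mem_range.mpr (by omega)
  have hm : true ∈ maskI n W K := by
    refine List.mem_map.mpr ⟨0, h0, maskF_zero n W K⟩
  exact List.contains_iff_mem.mpr hm

lemma maskI_getD (n W K : Int) (j : Nat) (hj : j < n.toNat) :
    (maskI n W K).getD j false = maskF n W K j := by
  have hl : j < (maskI n W K).length := by rw [maskI_length]; exact hj
  rw [List.getD_eq_getElem _ _ hl, maskI_getElem]

lemma trig_le (n k : Int) (hk : k ≠ 0) : trig n k ≤ n := by
  have := Int.ediv_mul_le n hk
  unfold trig; nlinarith [this]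

lemma trig_ge (n k : Int) (hk : 0 < k) (hkn : k ≤ n) : k ≤ trig n k := by
  have h1 : 1 ≤ n / k := by rw [Int.le_ediv_iff_mul_le hk]; omega
  unfold trig; nlinarith

lemma le_trig_of_dvd (n W K : Int) (hK : 0 < K) (hd : K ∣ W) (hWn : W ≤ n) : W ≤ trig n K := by
  have h1 : W / K ≤ n / K := Int.ediv_le_ediv hK hWn
  have h2 : K * (W / K) = W := Int.mul_ediv_cancel' hd
  unfold trig; nlinarith

lemma maskI_set (n W K : Int) (h2 : 2 ≤ K) (hKn : K ≤ n) (ht : trig n K = W) :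
    (maskI n W K).set (K-1).toNat false = maskI n W (K-1) := by
  apply List.ext_getElem
  · simp [maskI]
  intro i hi hi2
  have hi' : i < n.toNat := by rw [maskI_length] at hi2; exact hi2
  rw [List.getElem_set, maskI_getElem]
  by_cases hik : (K-1).toNat = i
  · rw [if_pos hik]
    subst hik
    have h1 : ¬ (((K-1).toNat : Int) = 0) := by omega
    have h2' : ¬ (((K-1).toNat : Int) + 1 ≤ K - 1) := by omega
    have h3 : ((K-1).toNat : Int) + 1 = K := by omega
    rw [eq_comm, maskI_getElem]
    unfold maskF
    rw [decide_eq_false_iff_not]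
    rintro (h | h)
    · omega
    · rw [if_neg h2', h3, ht] at h; omega
  · rw [if_neg hik, maskI_getElem]
    unfold maskF
    apply (decide_eq_decide).mpr
    have hne : ((i:Int) + 1) ≠ K := by omega
    constructor <;> (intro h; rcases h with h | h)
    · exact Or.inl h
    · right; split at h <;> split <;> omega
    · exact Or.inl h
    · right; split at h <;> split <;> omega

lemma maskI_stay (n W K : Int) (hc : ¬ (K ∣ W ∧ trig n K ≤ W)) : maskI n W K = maskI n W (K-1) := by
  have hdt : K ∣ trig n K := Dvd.intro _ rfl
  have hiff : (trig n K ≤ W ↔ trig n K ≤ W - 1) := by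
    constructor
    · intro h
      rcases eq_or_lt_of_le h with he | hl
      · exact absurd ⟨he ▸ hdt, h⟩ hc
      · omega
    · omega
  apply List.ext_getElem
  · simp [maskI]
  intro i hi hi2
  rw [maskI_getElem, maskI_getElem]
  unfold maskF
  apply (decide_eq_decide).mpr
  by_cases hik : ((i:Int) + 1) = K
  · rw [hik]
    rw [if_pos (le_refl K), if_neg (by omega)]
    constructor <;> (intro h; rcases h with h | h)
    · exact Or.inl h
    · exact Or.inr (hiff.mp h)
    · exact Or.inl h
    · exact Or.inr (hiff.mpr h)
  · constructor <;> (intro h; rcases h with h | h)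
    · exact Or.inl h
    · right; split at h <;> split <;> omega
    · exact Or.inl h
    · right; split at h <;> split <;> omega

lemma maskI_shift (n W : Int) (hn : 2 ≤ n) : maskI n W 1 = maskI n (W-1) n := by
  apply List.ext_getElem
  · simp [maskI]
  intro i hi hi2
  have hi' : i < n.toNat := by rw [maskI_length] at hi; exact hi
  rw [maskI_getElem, maskI_getElem]
  unfold maskF
  apply (decide_eq_decide).mpr
  have hin : (i:Int) + 1 ≤ n := by omega
  by_cases hi0 : (i:Int) = 0
  · simp [hi0]
  · constructor <;> (intro h; rcases h with h | h)
    · exact Or.inl h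
    · right; rw [if_pos hin]; rw [if_neg (by omega)] at h; exact h
    · exact Or.inl h
    · right; rw [if_neg (by omega)]; rw [if_pos hin] at h; exact h

lemma maskI_full (n : Int) (hn : 2 ≤ n) : maskI n n n = List.replicate n.toNat true := by
  apply List.ext_getElem
  · simp [maskI]
  intro i hi hi2
  have hi' : i < n.toNat := by rw [maskI_length] at hi; exact hi
  rw [maskI_getElem, List.getElem_replicate]
  unfold maskF
  rw [decide_eq_true_iff]
  right
  rw [if_pos (by omega)]
  exact trig_le n _ (by omega)

lemma inner_eq (f : Int → Int) (n W : Int) (hn : 2 ≤ n) (_hW2 : 2 ≤ W) (hWn : W ≤ n) :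
    ∀ (m : Nat) (K : Int), K = 1 + m → K ≤ n → ∀ acc,
    balancerInner f W (PySem.List.pyRange K 1 (-1)) (acc, maskI n W K)
      = (acc + ((PySem.List.pyRange K 1 (-1)).map
            (fun k => if trig n k = W then f (n / k) else 0)).sum,
         maskI n W 1) := by
  intro m
  induction m with
  | zero =>
    intro K hK hKn acc
    have h1 : K = 1 := by omega
    subst h1
    rw [PySem.List.pyRange_neg_one_eq_nil (by omega)]
    simp [balancerInner]
  | succ m ih =>
    intro K hK hKn acc
    have hK2 : 2 ≤ K := by omega
    rw [PySem.List.pyRange_neg_one_cons (by omega : (1:Int) < K)]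
    show balancerInner f W (K :: _) (acc, maskI n W K) = _
    rw [balancerInner]
    rw [maskI_contains n W K (by omega)]
    simp only [Bool.not_true, Bool.false_eq_true, if_false]
    have hj : ((K-1).toNat : Int) = K - 1 := by omega
    have hjn : (K-1).toNat < n.toNat := by omega
    rw [maskI_getD n W K _ hjn]
    have hmf : maskF n W K (K-1).toNat = decide (trig n K ≤ W) := by
      unfold maskF
      apply (decide_eq_decide).mpr
      constructor
      · rintro (h | h)
        · omega
        · rwa [if_pos (by omega), (by omega : ((K-1).toNat : Int) + 1 = K)] at h
      · intro h
        right
        rw [if_pos (by omega), (by omega : ((K-1).toNat : Int) + 1 = K)]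
        exact h
    rw [hmf]
    rw [PySem.Int.mod_eq_emod_of_pos (by omega : (0:Int) < K)]
    by_cases hc : K ∣ W ∧ trig n K ≤ W
    · have hd : W % K = 0 := Int.emod_eq_zero_of_dvd hc.1
      have ht : trig n K = W := le_antisymm hc.2 (le_trig_of_dvd n W K (by omega) hc.1 hWn)
      rw [hd]
      simp only [hc.2, decide_true, Bool.and_true, beq_self_eq_true, if_true]
      rw [maskI_set n W K hK2 hKn ht]
      rw [PySem.Int.floordiv_eq_ediv_of_pos (by omega : (0:Int) < K)]
      have hWK : W / K = n / K := by
        rw [← ht]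
        exact Int.mul_ediv_cancel_left (n / K) (by omega)
      rw [hWK]
      rw [ih (K-1) (by omega) (by omega) (acc + f (n / K))]
      rw [List.map_cons, List.sum_cons, if_pos ht]
      rw [Prod.mk.injEq]
      exact ⟨by ring, rfl⟩
    · rw [maskI_stay n W K hc]
      have hz : ((W % K == 0) && decide (trig n K ≤ W)) = false := by
        rcases Classical.em (K ∣ W) with hd | hd
        · have h2 : ¬ trig n K ≤ W := fun h => hc ⟨hd, h⟩
          simp [h2]
        · have h2 : ¬ (W % K = 0) := fun h => hd (Int.dvd_of_emod_eq_zero h)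
          simp [h2]
      rw [hz]
      simp only [Bool.false_eq_true, if_false]
      rw [ih (K-1) (by omega) (by omega) acc]
      have htne : trig n K ≠ W := by
        intro h
        exact hc ⟨h ▸ Dvd.intro _ rfl, le_of_eq h⟩
      rw [List.map_cons, List.sum_cons, if_neg htne]
      simp

lemma outer_eq (f : Int → Int) (n : Int) (hn : 2 ≤ n) :
    ∀ (m : Nat) (W : Int), W = 1 + m → W ≤ n → ∀ acc,
    balancerOuter f n (PySem.List.pyRange W 1 (-1)) (acc, maskI n W n)
      = (acc + ((PySem.List.pyRange n 1 (-1)).map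
            (fun k => if trig n k ≤ W then f (n / k) else 0)).sum,
         maskI n 1 n) := by
  intro m
  induction m with
  | zero =>
    intro W hW hWn acc
    have h1 : W = 1 := by omega
    subst h1
    rw [PySem.List.pyRange_neg_one_eq_nil (by omega)]
    have hz : ((PySem.List.pyRange n 1 (-1)).map
        (fun k => if trig n k ≤ (1:Int) then f (n / k) else 0)) =
        (PySem.List.pyRange n 1 (-1)).map (fun _ => (0:Int)) := by
      apply List.map_eq_map_iff.mpr
      intro k hk
      have hm := (PySem.List.mem_pyRange_neg_one).mp hk
      have : (2:Int) ≤ trig n k := le_trans (by omega) (trig_ge n k (by omega) hm.2)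
      rw [if_neg (by omega)]
    rw [hz]
    simp [balancerOuter, List.map_const']
  | succ m ih =>
    intro W hW hWn acc
    have hW2 : 2 ≤ W := by omega
    rw [PySem.List.pyRange_neg_one_cons (by omega : (1:Int) < W)]
    show balancerOuter f n (W :: _) (acc, maskI n W n) = _
    rw [balancerOuter]
    show (if !(maskI n W n).contains true then _ else _) = _
    rw [maskI_contains n W n (by omega)]
    simp only [Bool.not_true, Bool.false_eq_true, if_false]
    rw [inner_eq f n W hn hW2 hWn (n-1).toNat n (by omega) (le_refl n) acc]
    rw [maskI_shift n W hn]
    rw [ih (W-1) (by omega) (by omega) _]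
    rw [Prod.mk.injEq]
    refine ⟨?_, rfl⟩
    have hsum : ((PySem.List.pyRange n 1 (-1)).map
          (fun k => if trig n k = W then f (n / k) else 0)).sum
        + ((PySem.List.pyRange n 1 (-1)).map
          (fun k => if trig n k ≤ W - 1 then f (n / k) else 0)).sum
        = ((PySem.List.pyRange n 1 (-1)).map
          (fun k => if trig n k ≤ W then f (n / k) else 0)).sum := by
      rw [← PySem.List.sum_map_add_int]
      refine congrArg _ (List.map_eq_map_iff.mpr ?_)
      intro k _
      split_ifs <;> omega
    rw [add_assoc, hsum]

lemma balancerGo_eq_alt : ∀ (fuel : Nat) (weight : Int), weight.toNat < fuel →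
    balancerGo fuel weight = balancer_alt weight := by
  intro fuel
  induction fuel with
  | zero => intro w hw; omega
  | succ fuel ih =>
    intro n hfuel
    by_cases h1 : n = 1
    · subst h1
      rw [balancerGo, balancer_alt]
      simp
    · by_cases hn : n ≤ 1
      · -- n ≤ 0: everything is empty on both sides
        rw [balancerGo, if_neg h1]
        rw [PySem.List.pyRange_one_eq_nil (by omega : n ≤ 0)]
        rw [PySem.List.pyRange_neg_one_eq_nil (by omega : n ≤ 1)]
        rw [balancer_alt, if_neg h1]
        rw [PySem.List.pyRange_one_eq_nil (by omega : n + 1 ≤ 2)]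
        simp [balancerOuter]
      · have hn2 : 2 ≤ n := by omega
        rw [balancerGo, if_neg h1]
        have hposs : (PySem.List.pyRange 0 n 1).foldl (fun p _ => p ++ [true]) [] = maskI n n n := by
          rw [PySem.List.foldl_append_singleton_eq_map (f := fun _ => true)]
          rw [maskI_full n hn2, List.map_const', PySem.List.length_pyRange_one]
          simp
        rw [hposs]
        show (balancerOuter (balancerGo fuel) n (PySem.List.pyRange n 1 (-1)) (0, maskI n n n)).1
          = balancer_alt n
        rw [outer_eq (balancerGo fuel) n hn2 (n-1).toNat n (by omega) (le_refl n) 0]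
        simp only [zero_add]
        have hmap : ((PySem.List.pyRange n 1 (-1)).map
              (fun k => if trig n k ≤ n then balancerGo fuel (n / k) else 0))
            = (PySem.List.pyRange n 1 (-1)).map (fun k => balancer_alt (n / k)) := by
          apply List.map_eq_map_iff.mpr
          intro k hk
          have hm := (PySem.List.mem_pyRange_neg_one).mp hk
          rw [if_pos (trig_le n k (by omega))]
          have hlt : n / k < n := Int.ediv_lt_of_lt_mul (by omega) (by nlinarith [hm.1, hm.2])
          have hge : 0 ≤ n / k := Int.ediv_nonneg (by omega) (by omega)
          exact ih (n / k) (by omega)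
        rw [hmap]
        rw [balancer_alt, if_neg h1]
        rw [List.attach_map_val
          (l := PySem.List.pyRange 2 (n + 1) 1)
          (f := fun k => balancer_alt (PySem.Int.floordiv n k))]
        have hmap2 : ((PySem.List.pyRange 2 (n+1) 1).map
              (fun k => balancer_alt (PySem.Int.floordiv n k)))
            = (PySem.List.pyRange 2 (n+1) 1).map (fun k => balancer_alt (n / k)) := by
          apply List.map_eq_map_iff.mpr
          intro k hk
          have hm := (PySem.List.mem_pyRange_one).mp hk
          rw [PySem.Int.floordiv_eq_ediv_of_pos (by omega : (0:Int) < k)]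
        rw [hmap2]
        rw [PySem.List.pyRange_neg_one_eq_reverse]
        rw [List.map_reverse, List.sum_reverse]
        norm_num

-- ===== VERDICT (by name: the statement is the Claim_ definition above) =====
theorem balancer_spec : Claim_equal_balancer := by
  intro weight _
  unfold Spec_balancer balancer
  exact balancerGo_eq_alt _ _ (by omega)
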